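-- pv_equiv track=rewrite | github.com/PlanXLab/replx_libs | device/ticle/src/ext/distance/vl53l0x/vl53l0x.py | _encode_timeout
-- ===== SOURCE A (Python) =====
-- def _encode_timeout(timeout_mclks):
--     if timeout_mclks <= 0:
--         return 0
--
--     ls = int(timeout_mclks) - 1
--     ms = 0
--     while ls > 255:
--         ls >>= 1
--         ms += 1
--     return ((ms << 8) | (ls & 0xFF)) & 0xFFFF
-- ===== SOURCE B (Python) =====
-- def _encode_timeout(timeout_mclks):
--     if timeout_mclks <= 0:
--         return 0
--     ls = int(timeout_mclks) - 1
--     ms = max(0, ls.bit_length() - 8)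
--     ls >>= ms
--     return ((ms << 8) | (ls & 0xFF)) & 0xFFFF
-- ===== Notes on version B (the rewrite author's own statement) =====
-- stated objective: simpler
-- what changed: Replaces the halve-and-count while-loop with a closed-form exponent ms = max(0, bit_length-8) and a single shift.
import Mathlib
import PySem

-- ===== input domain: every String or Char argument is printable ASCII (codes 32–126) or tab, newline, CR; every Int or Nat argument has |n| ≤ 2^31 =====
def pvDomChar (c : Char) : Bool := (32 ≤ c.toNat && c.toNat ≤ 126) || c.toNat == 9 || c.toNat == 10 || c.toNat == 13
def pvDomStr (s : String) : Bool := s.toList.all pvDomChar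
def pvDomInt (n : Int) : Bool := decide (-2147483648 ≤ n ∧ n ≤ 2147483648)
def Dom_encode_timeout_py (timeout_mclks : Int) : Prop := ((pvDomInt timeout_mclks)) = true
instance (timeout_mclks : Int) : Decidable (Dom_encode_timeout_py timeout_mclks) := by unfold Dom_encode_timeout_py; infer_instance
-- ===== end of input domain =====

-- B replaces A's halve-and-count while-loop by the closed-form exponent max(0, bit_length-8) and one shift (objective: simpler).

-- ===== PORT A =====
-- the while-loop: while ls > 255: ls >>= 1; ms += 1
def pvLoopA (ls ms : Int) : Int × Int :=
  if 255 < ls then pvLoopA (ls >>> (1:Nat)) (ms + 1) else (ls, ms)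
termination_by ls.toNat
decreasing_by
  have : ls >>> (1:Nat) = ls / 2 := by
    simp [Int.shiftRight_eq_div_pow]
  omega

def encode_timeout_py (timeout_mclks : Int) : Int :=
  if timeout_mclks ≤ 0 then 0
  else
    let ls := timeout_mclks - 1   -- int(timeout_mclks) is the identity on int
    let p := pvLoopA ls 0
    PySem.Int.band (PySem.Int.bor (p.2 <<< 8) (PySem.Int.band p.1 255)) 65535

-- ===== PORT B =====
def encode_timeout_py_alt (timeout_mclks : Int) : Int :=
  if timeout_mclks ≤ 0 then 0
  else
    let ls := timeout_mclks - 1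
    -- Nat subtraction is exactly Python's max(0, bit_length - 8)
    let ms : Nat := PySem.Int.bitLength ls - 8
    let ls' := ls >>> ms
    PySem.Int.band (PySem.Int.bor ((ms : Int) <<< 8) (PySem.Int.band ls' 255)) 65535

-- ===== PRECONDITION & SPEC =====
def Spec_encode_timeout_py (timeout_mclks : Int) (out : Int) : Prop := out = encode_timeout_py_alt timeout_mclks
instance (timeout_mclks : Int) (out : Int) : Decidable (Spec_encode_timeout_py timeout_mclks out) := by unfold Spec_encode_timeout_py; infer_instance

-- ===== CLAIM (what is proved, stated in full; the proofs are below) =====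
def Claim_equal_encode_timeout_py : Prop := ∀ (timeout_mclks : Int), Dom_encode_timeout_py timeout_mclks → Spec_encode_timeout_py timeout_mclks (encode_timeout_py timeout_mclks)

-- ===== LEMMAS AND PROOFS =====

-- A's loop computes the closed form: shift count = max(0, bitLength - 8)
theorem pvShiftRight_one (ls : Int) : ls >>> (1:Nat) = ls / 2 := by
  simp [Int.shiftRight_eq_div_pow]

theorem pvShiftRight_comp (n : Int) (k : Nat) : (n >>> (1:Nat)) >>> k = n >>> (1+k) := by
  simp only [Int.shiftRight_eq_div_pow]
  push_cast
  rw [Int.ediv_ediv_of_nonneg (by norm_num : (0:Int) ≤ 2)]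
  norm_num [pow_add]

theorem pvBitLength_big (n : Int) (h : 255 < n) : 9 ≤ PySem.Int.bitLength n := by
  by_contra hc
  have h1 := PySem.Int.lt_two_pow_bitLength n
  have h2 : (2:Nat)^(PySem.Int.bitLength n) ≤ 2^8 := Nat.pow_le_pow_right (by norm_num) (by omega)
  have : n.natAbs < 256 := lt_of_lt_of_le h1 h2
  omega

theorem pvBitLength_small (n : Int) (h : 0 ≤ n) (h2 : n ≤ 255) : PySem.Int.bitLength n - 8 = 0 := by
  rcases eq_or_lt_of_le h with h0 | h0
  · simp [← h0]
  · have hle := PySem.Int.two_pow_bitLength_le n (by omega)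
    by_contra hc
    have : (2:Nat)^8 ≤ 2^(PySem.Int.bitLength n - 1) := Nat.pow_le_pow_right (by norm_num) (by omega)
    have : 256 ≤ n.natAbs := le_trans this hle
    omega

theorem pvLoopA_eq (ls ms : Int) (h : 0 ≤ ls) :
    pvLoopA ls ms = (ls >>> (PySem.Int.bitLength ls - 8), ms + ((PySem.Int.bitLength ls - 8 : Nat) : Int)) := by
  rw [pvLoopA]
  by_cases hb : 255 < ls
  · simp only [hb, if_true]
    have hrec : PySem.Int.bitLength ls = PySem.Int.bitLength (ls >>> (1:Nat)) + 1 := by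
      rw [PySem.Int.bitLength_of_pos (by omega : (0:Int) < ls)]
      congr 1
      rw [pvShiftRight_one]
      simp [PySem.Int.floordiv]
      rw [Int.fdiv_eq_ediv]; simp
    have h9 := pvBitLength_big ls hb
    have hsub : PySem.Int.bitLength ls - 8 = 1 + (PySem.Int.bitLength (ls >>> (1:Nat)) - 8) := by
      omega
    have hpos : (0:Int) ≤ ls >>> (1:Nat) := by
      rw [pvShiftRight_one]; omega
    rw [pvLoopA_eq (ls >>> (1:Nat)) (ms + 1) hpos, hsub, ← pvShiftRight_comp]
    congr 1
    push_cast
    ring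
  · simp only [hb, if_false]
    rw [pvBitLength_small ls h (by omega)]
    simp
termination_by ls.toNat
decreasing_by
  have : ls >>> (1:Nat) = ls / 2 := pvShiftRight_one ls
  omega

-- ===== VERDICT (by name: the statement is the Claim_ definition above) =====
theorem encode_timeout_py_spec : Claim_equal_encode_timeout_py := by
  intro t _
  unfold Spec_encode_timeout_py encode_timeout_py encode_timeout_py_alt
  by_cases h : t ≤ 0
  · simp [h]
  · simp only [h, if_false]
    rw [pvLoopA_eq (t - 1) 0 (by omega)]
    simp
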